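-- pv_equiv track=rewrite | github.com/nlapier2/mscaviar_replication | simulation_scripts/Simulation/subset_sample.py | subset_ID_by_ethnicity
-- ===== SOURCE A (Python) =====
-- def subset_ID_by_ethnicity(id_to_ethnicity, unrelated_British, sample_size = 9000):
--     ASN_sample_1 = []
--     EUR_sample_2 = []
--     EUR_sample_3 = []
--
--     ASN_full = False
--     EUR_full = False
--
--     for i in range(len(id_to_ethnicity)):
--         if id_to_ethnicity[i][1] == 'British':
--         # if id_to_ethnicity[i][1] == 'British' and id_to_ethnicity[i][0] in unrelated_British:
--             if len(EUR_sample_2) < 9000: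
--                 EUR_sample_2.append(id_to_ethnicity[i])
--             elif len(EUR_sample_3) < 9000:
--                 EUR_sample_3.append(id_to_ethnicity[i])
--             else:
--                 EUR_full = True
--         elif id_to_ethnicity[i][1] == 'Any other Asian background' or id_to_ethnicity[i][1] == 'Chinese' or id_to_ethnicity[i][1] == 'Indian':
--             if len(ASN_sample_1) < 9000:
--                 ASN_sample_1.append(id_to_ethnicity[i])
--             else:
--                 ASN_full = True
--         if EUR_full and ASN_full:
--             break
--
--     return ASN_sample_1, EUR_sample_2, EUR_sample_3
-- ===== SOURCE B (Python) =====
-- def subset_ID_by_ethnicity(id_to_ethnicity, unrelated_British, sample_size = 9000):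
--     british = [e for e in id_to_ethnicity if e[1] == 'British']
--     asian = [e for e in id_to_ethnicity
--              if e[1] in ('Any other Asian background', 'Chinese', 'Indian')]
--     return asian[:9000], british[:9000], british[9000:18000]
-- ===== Notes on version B (the rewrite author's own statement) =====
-- stated objective: simpler
-- what changed: Replaces the stateful loop with capacity counters and full/break flags by two filters in iteration order followed by slicing (first 9000 Asian, first 9000 and next 9000 British); the early break is output-neutral because it fires only when both buckets are full.
import Mathlib
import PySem

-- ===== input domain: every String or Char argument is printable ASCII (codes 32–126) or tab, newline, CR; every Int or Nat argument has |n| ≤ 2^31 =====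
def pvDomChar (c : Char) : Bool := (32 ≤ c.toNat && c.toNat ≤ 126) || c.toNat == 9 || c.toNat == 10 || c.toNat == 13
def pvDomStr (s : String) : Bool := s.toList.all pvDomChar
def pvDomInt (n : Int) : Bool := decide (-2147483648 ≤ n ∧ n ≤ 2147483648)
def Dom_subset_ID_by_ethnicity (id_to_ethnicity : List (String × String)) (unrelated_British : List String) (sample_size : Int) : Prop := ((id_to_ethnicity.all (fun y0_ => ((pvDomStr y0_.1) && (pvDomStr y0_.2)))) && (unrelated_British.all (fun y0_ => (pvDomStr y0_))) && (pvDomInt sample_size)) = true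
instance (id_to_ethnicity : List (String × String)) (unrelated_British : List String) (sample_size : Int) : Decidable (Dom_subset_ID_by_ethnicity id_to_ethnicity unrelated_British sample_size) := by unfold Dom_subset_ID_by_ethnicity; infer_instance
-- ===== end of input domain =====

-- B replaces A's stateful loop (capacity counters, full flags, early break) by two filters in
-- iteration order followed by slicing — simpler, same O(n) cost, same return value.
-- The ethnicity tests, identical in both Pythons, are shared helpers.
def pvIsBrit (x : String × String) : Bool := x.2 == "British"
def pvIsAsn (x : String × String) : Bool :=
  x.2 == "Any other Asian background" || x.2 == "Chinese" || x.2 == "Indian"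

-- ===== PORT A =====
-- A's for-loop: state (ASN_sample_1, EUR_sample_2, EUR_sample_3, ASN_full, EUR_full),
-- with the 'if EUR_full and ASN_full: break' test at the end of each iteration body
def pvLoopA : List (String × String) → List (String × String) → List (String × String) →
    List (String × String) → Bool → Bool →
    (List (String × String)) × (List (String × String)) × (List (String × String))
  | [], a, e2, e3, _, _ => (a, e2, e3)
  | x :: xs, a, e2, e3, af, ef =>
    let st :=
      if pvIsBrit x then
        if e2.length < 9000 then (a, e2 ++ [x], e3, af, ef)
        else if e3.length < 9000 then (a, e2, e3 ++ [x], af, ef)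
        else (a, e2, e3, af, true)
      else if pvIsAsn x then
        if a.length < 9000 then (a ++ [x], e2, e3, af, ef)
        else (a, e2, e3, true, ef)
      else (a, e2, e3, af, ef)
    if st.2.2.2.2 && st.2.2.2.1 then (st.1, st.2.1, st.2.2.1)
    else pvLoopA xs st.1 st.2.1 st.2.2.1 st.2.2.2.1 st.2.2.2.2

def subset_ID_by_ethnicity (id_to_ethnicity : List (String × String)) (unrelated_British : List String) (sample_size : Int) : (List (String × String)) × (List (String × String)) × (List (String × String)) :=
  pvLoopA id_to_ethnicity [] [] [] false false

-- ===== PORT B =====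
def subset_ID_by_ethnicity_alt (id_to_ethnicity : List (String × String)) (unrelated_British : List String) (sample_size : Int) : (List (String × String)) × (List (String × String)) × (List (String × String)) :=
  let british := id_to_ethnicity.filter pvIsBrit
  let asian := id_to_ethnicity.filter pvIsAsn
  (asian.take 9000, british.take 9000, (british.drop 9000).take 9000)

-- ===== PRECONDITION & SPEC =====
def Spec_subset_ID_by_ethnicity (id_to_ethnicity : List (String × String)) (unrelated_British : List String) (sample_size : Int) (out : (List (String × String)) × (List (String × String)) × (List (String × String))) : Prop := out = subset_ID_by_ethnicity_alt id_to_ethnicity unrelated_British sample_size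
instance (id_to_ethnicity : List (String × String)) (unrelated_British : List String) (sample_size : Int) (out : (List (String × String)) × (List (String × String)) × (List (String × String))) : Decidable (Spec_subset_ID_by_ethnicity id_to_ethnicity unrelated_British sample_size out) := by unfold Spec_subset_ID_by_ethnicity; infer_instance

-- ===== CLAIM (what is proved, stated in full; the proofs are below) =====
def Claim_equal_subset_ID_by_ethnicity : Prop := ∀ (id_to_ethnicity : List (String × String)) (unrelated_British : List String) (sample_size : Int), Dom_subset_ID_by_ethnicity id_to_ethnicity unrelated_British sample_size → Spec_subset_ID_by_ethnicity id_to_ethnicity unrelated_British sample_size (subset_ID_by_ethnicity id_to_ethnicity unrelated_British sample_size)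

-- ===== LEMMAS AND PROOFS =====

lemma pvBrit_not_asn {x : String × String} (h : pvIsBrit x = true) : pvIsAsn x = false := by
  simp [pvIsBrit] at h
  simp [pvIsAsn, h]

set_option maxHeartbeats 1000000 in
lemma pvLoopA_eq (xs : List (String × String)) :
    ∀ (a e2 e3 : List (String × String)) (af ef : Bool),
    a.length ≤ 9000 → e2.length ≤ 9000 → e3.length ≤ 9000 →
    (af = true → a.length = 9000) →
    (ef = true → e2.length = 9000 ∧ e3.length = 9000) →
    pvLoopA xs a e2 e3 af ef =
      (a ++ (xs.filter pvIsAsn).take (9000 - a.length),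
       e2 ++ (xs.filter pvIsBrit).take (9000 - e2.length),
       e3 ++ ((xs.filter pvIsBrit).drop (9000 - e2.length)).take (9000 - e3.length)) := by
  induction xs with
  | nil => intro a e2 e3 af ef _ _ _ _ _; simp [pvLoopA]
  | cons x xs ih =>
    intro a e2 e3 af ef ha he2 he3 haf hef
    rw [pvLoopA]
    by_cases hb : pvIsBrit x = true
    · have hasn := pvBrit_not_asn hb
      by_cases h2 : e2.length < 9000
      · have hef' : ef = false := by
          cases ef
          · rfl
          · exact absurd (hef rfl).1 (by omega)
        have hstep : (9000 - e2.length) = (9000 - (e2.length + 1)) + 1 := by omega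
        simp only [hb, if_true, h2, if_pos, hef', Bool.false_and, Bool.false_eq_true,
          if_false]
        rw [ih a (e2 ++ [x]) e3 af false ha (by simp; omega) he3 haf (by simp)]
        simp only [List.filter_cons, hb, hasn, if_true, Bool.false_eq_true, if_false,
          List.length_append, List.length_cons, List.length_nil, Nat.zero_add, hstep,
          List.take_succ_cons, List.drop_succ_cons, List.append_assoc, List.cons_append,
          List.nil_append, Nat.add_sub_cancel]
      · have h2e : e2.length = 9000 := by omega
        by_cases h3 : e3.length < 9000
        · have hef' : ef = false := by
            cases ef
            · rfl
            · exact absurd (hef rfl).2 (by omega)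
          have hstep : (9000 - e3.length) = (9000 - (e3.length + 1)) + 1 := by omega
          simp only [hb, if_true, h2, if_false, h3, if_pos, hef', Bool.false_and,
            Bool.false_eq_true]
          rw [ih a e2 (e3 ++ [x]) af false ha he2 (by simp; omega) haf (by simp)]
          simp only [List.filter_cons, hb, hasn, if_true, Bool.false_eq_true, if_false,
            List.length_append, List.length_cons, List.length_nil, Nat.zero_add, h2e,
            Nat.sub_self, List.take_zero, List.drop_zero, hstep, List.take_succ_cons,
            List.append_assoc, List.cons_append, List.nil_append, List.append_nil]
        · have h3e : e3.length = 9000 := by omega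
          simp only [hb, if_true, h2, h3, if_false, Bool.and_true]
          by_cases haft : af = true
          · have hae := haf haft
            simp only [haft, if_true]
            simp [List.filter_cons, hb, hasn, h2e, h3e, hae]
          · have haf' : af = false := by cases af; rfl; exact absurd rfl haft
            simp only [haf', Bool.and_false, Bool.false_eq_true, if_false]
            rw [ih a e2 e3 false true ha he2 he3 (by simp) (fun _ => ⟨h2e, h3e⟩)]
            simp [List.filter_cons, hb, hasn, h2e, h3e]
    · have hb' : pvIsBrit x = false := by cases hx : pvIsBrit x; rfl; exact absurd hx hb
      by_cases has : pvIsAsn x = true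
      · by_cases h1 : a.length < 9000
        · have haf' : af = false := by
            cases af
            · rfl
            · exact absurd (haf rfl) (by omega)
          have hstep : (9000 - a.length) = (9000 - (a.length + 1)) + 1 := by omega
          simp only [hb', Bool.false_eq_true, if_false, has, if_true, h1, if_pos, haf',
            Bool.and_false]
          rw [ih (a ++ [x]) e2 e3 false ef (by simp; omega) he2 he3 (by simp) hef]
          simp only [List.filter_cons, hb', has, if_true, Bool.false_eq_true, if_false,
            List.length_append, List.length_cons, List.length_nil, Nat.zero_add, hstep,
            List.take_succ_cons, List.append_assoc, List.cons_append, List.nil_append]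
        · have h1e : a.length = 9000 := by omega
          simp only [hb', Bool.false_eq_true, if_false, has, if_true, h1, Bool.true_and]
          by_cases heft : ef = true
          · have h23 := hef heft
            simp only [heft, if_true]
            simp [List.filter_cons, hb', has, h1e, h23.1, h23.2]
          · have hef' : ef = false := by cases ef; rfl; exact absurd rfl heft
            simp only [hef', Bool.false_eq_true, if_false]
            rw [ih a e2 e3 true false ha he2 he3 (fun _ => h1e) (by simp)]
            simp [List.filter_cons, hb', has, h1e]
      · have has' : pvIsAsn x = false := by cases hx : pvIsAsn x; rfl; exact absurd hx has
        simp only [hb', has', Bool.false_eq_true, if_false]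
        by_cases hba : (ef && af) = true
        · obtain ⟨heft, haft⟩ := Bool.and_eq_true_iff.mp hba
          have hae := haf haft
          have h23 := hef heft
          simp only [hba, if_true]
          simp [List.filter_cons, hb', has', hae, h23.1, h23.2]
        · have hba' : (ef && af) = false := by cases h : (ef && af); rfl; exact absurd h hba
          simp only [hba', Bool.false_eq_true, if_false]
          rw [ih a e2 e3 af ef ha he2 he3 haf hef]
          simp [List.filter_cons, hb', has']

-- ===== VERDICT (by name: the statement is the Claim_ definition above) =====
theorem subset_ID_by_ethnicity_spec : Claim_equal_subset_ID_by_ethnicity := by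
  intro id_to_ethnicity unrelated_British sample_size _
  unfold Spec_subset_ID_by_ethnicity subset_ID_by_ethnicity subset_ID_by_ethnicity_alt
  rw [pvLoopA_eq id_to_ethnicity [] [] [] false false (by simp) (by simp) (by simp)
    (by simp) (by simp)]
  simp
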